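-- pv_equiv track=rewrite | github.com/eunryung228/EulerProject | EulerPJ0712/17.py | numtoEng
-- ===== SOURCE A (Python) =====
-- dic={1:3, 2:3, 3:5, 4:4, 5:4, 6:3, 7:5, 8:5, 9:4, 10:3, 11:6, 12:6, 13:8, 14:8, 15:7, 16:7, 17:9, 18:8, 19:8, 20:6, 30:6, 40:5, 50:5, 60:5, 70:7, 80:6, 90:6, 100:7, 1000:11, 'and':3}
--
-- def numtoEng(num):
--     n=0
--     result=0
--     while n<num:
--         n+=1
--         if n<=10:
--             result+=dic.get(n)
--         elif n<100:
--             a = n % 10  # 일의 자리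
--             b = n // 10 % 10  # 십의 자리
--             if b==1:
--                 result+=dic.get(b*10+a)
--             else:
--                 result+=dic.get(b*10)
--                 if a:
--                     result+=dic.get(a)
--         elif n<1000:
--             a=n%10      # 일의 자리
--             b=n//10%10  # 십의 자리
--             c=n//100%10 # 백의 자리
--             result+=dic.get(c)+dic.get(100)
--             if b==1:
--                 result+=dic.get('and')+dic.get(b*10+a)
--             elif b:
--                 result+=dic.get('and')+dic.get(b*10)
--                 if a:
--                     result+=dic.get(a)
--             elif a:
--                 result+=dic.get('and')+dic.get(a)
--         elif n==1000:
--             result+=dic.get(1000)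
--     return result
-- ===== SOURCE B (Python) =====
-- ONES = [0, 3, 3, 5, 4, 4, 3, 5, 5, 4]   # "", one..nine
-- TENS = [0, 0, 6, 6, 5, 5, 5, 7, 6, 6]   # "", "", twenty..ninety
-- # cumulative tables: _CUM[k] = sum of the first k letter counts
-- ONES_CUM = [0, 0, 3, 6, 11, 15, 19, 22, 27, 32, 36]
-- TEENS_CUM = [0, 3, 9, 15, 23, 31, 38, 45, 54, 62, 70]      # ten..nineteen
-- # LOW_CUM[t] = total letters of the last-two-digit parts of residues 0..10*t-1
-- LOW_CUM = [0, 36, 106, 202, 298, 384, 470, 556, 662, 758, 854]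
--
--
-- def _low_prefix(k):
--     # letters of the last-two-digit part summed over residues 0..k-1 (0 <= k <= 100), by table lookup
--     t0, o0 = divmod(k, 10)
--     s = LOW_CUM[t0]
--     if o0:
--         s += TEENS_CUM[o0] if t0 == 1 else o0 * TENS[t0] + ONES_CUM[o0]
--     return s
--
--
-- def numtoEng(num):
--     # closed-form place-value aggregation over 1..m: no per-number work at all
--     m = min(num, 1000)
--     if m <= 0:
--         return 0
--     total = 11 if m == 1000 else 0
--     M = min(m, 999)
--     q, s = divmod(M, 100)
--     # last-two-digit parts: q full cycles of residues 0..99, then residues 0..s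
--     total += q * 854 + _low_prefix(s + 1)
--     if q:
--         # full hundreds h = 1..q-1: each "<h> hundred" occurs 100 times, "and" 99 times
--         total += 100 * (ONES_CUM[q] - ONES_CUM[1]) + (q - 1) * 997   # 997 = 100*7 + 99*3
--         # partial hundred h = q: occurs s+1 times, "and" s times
--         total += (s + 1) * (ONES[q] + 7) + 3 * s
--     return total
-- ===== Notes on version B (the rewrite author's own statement) =====
-- stated objective: faster
-- what changed: B replaces A's per-number while-loop (one dict-lookup branch ladder per integer 1..num) by closed-form place-value aggregation: it counts how often each last-two-digit residue and each hundreds digit occurs in 1..min(num,1000) and multiplies digit letter counts by those occurrence counts, so the work is O(1) instead of O(num).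
import Mathlib
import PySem

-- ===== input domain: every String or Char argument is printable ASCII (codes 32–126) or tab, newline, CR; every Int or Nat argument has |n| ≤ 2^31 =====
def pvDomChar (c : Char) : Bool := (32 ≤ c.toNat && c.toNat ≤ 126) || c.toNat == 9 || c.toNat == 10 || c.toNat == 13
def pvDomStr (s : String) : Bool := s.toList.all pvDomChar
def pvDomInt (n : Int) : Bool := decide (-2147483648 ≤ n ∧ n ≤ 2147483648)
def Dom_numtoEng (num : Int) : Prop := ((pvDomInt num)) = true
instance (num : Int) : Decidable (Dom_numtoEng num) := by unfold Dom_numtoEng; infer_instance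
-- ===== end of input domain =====

-- B replaces A's O(num) per-number loop by closed-form place-value aggregation (occurrence counting) over 1..min(num,1000): O(1).

-- ===== PORT A =====
-- the module-level dict with its int keys; the single string key 'and' (value 3) is kept
-- as the separate constant dicAnd below (exact: it is only read at the literal key 'and')
def dicA : PySem.Dict Int Int := PySem.Dict.ofList
  [(1,3),(2,3),(3,5),(4,4),(5,4),(6,3),(7,5),(8,5),(9,4),(10,3),(11,6),(12,6),(13,8),(14,8),
   (15,7),(16,7),(17,9),(18,8),(19,8),(20,6),(30,6),(40,5),(50,5),(60,5),(70,7),(80,6),(90,6),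
   (100,7),(1000,11)]

def dicAnd : Int := 3  -- dic.get('and')

-- dic.get(k); every key A looks up is present, so the default 0 is never returned
def dicGet (k : Int) : Int := (PySem.Dict.get? dicA k).getD 0

-- one iteration's updates to result, for the incremented value n
def stepA (result n : Int) : Int :=
  if n ≤ 10 then
    result + dicGet n
  else if n < 100 then
    let a := PySem.Int.mod n 10
    let b := PySem.Int.mod (PySem.Int.floordiv n 10) 10
    if b = 1 then result + dicGet (b*10+a)
    else
      let result := result + dicGet (b*10)
      if a ≠ 0 then result + dicGet a else result
  else if n < 1000 then
    let a := PySem.Int.mod n 10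
    let b := PySem.Int.mod (PySem.Int.floordiv n 10) 10
    let c := PySem.Int.mod (PySem.Int.floordiv n 100) 10
    let result := result + (dicGet c + dicGet 100)
    if b = 1 then result + (dicAnd + dicGet (b*10+a))
    else if b ≠ 0 then
      let result := result + (dicAnd + dicGet (b*10))
      if a ≠ 0 then result + dicGet a else result
    else if a ≠ 0 then result + (dicAnd + dicGet a)
    else result
  else if n = 1000 then result + dicGet 1000
  else result

-- the while-loop; fuel bounds the number of iterations (exact: the loop runs (num - n) times)
def loopA (fuel : Nat) (num n result : Int) : Int :=
  match fuel with
  | 0 => result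
  | f + 1 =>
    if n < num then loopA f num (n + 1) (stepA result (n + 1)) else result

def numtoEng (num : Int) : Int := loopA num.toNat num 0 0

-- ===== PORT B =====
def onesB : List Int := [0, 3, 3, 5, 4, 4, 3, 5, 5, 4]
def tensB : List Int := [0, 0, 6, 6, 5, 5, 5, 7, 6, 6]
-- cumulative tables: _CUM[k] = sum of the first k letter counts
def onesCum : List Int := [0, 0, 3, 6, 11, 15, 19, 22, 27, 32, 36]
def teensCum : List Int := [0, 3, 9, 15, 23, 31, 38, 45, 54, 62, 70]
-- lowCum[t] = total letters of the last-two-digit parts of residues 0..10*t-1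
def lowCum : List Int := [0, 36, 106, 202, 298, 384, 470, 556, 662, 758, 854]

-- letters of the last-two-digit part summed over residues 0..k-1, by table lookup;
-- list indexing: every index taken is in range, so pyGet?'s default 0 is never returned
def lowPrefix (k : Int) : Int :=
  let t0 := PySem.Int.floordiv k 10
  let o0 := PySem.Int.mod k 10
  let s := (PySem.List.pyGet? lowCum t0).getD 0
  if o0 ≠ 0 then
    s + (if t0 = 1 then (PySem.List.pyGet? teensCum o0).getD 0
         else o0 * (PySem.List.pyGet? tensB t0).getD 0 + (PySem.List.pyGet? onesCum o0).getD 0)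
  else s

-- closed-form place-value aggregation over 1..m: no per-number work at all
def numtoEng_alt (num : Int) : Int :=
  let m := min num 1000
  if m ≤ 0 then 0
  else
    let total : Int := if m = 1000 then 11 else 0
    let M := min m 999
    let q := PySem.Int.floordiv M 100
    let s := PySem.Int.mod M 100
    -- last-two-digit parts: q full cycles of residues 0..99, then residues 0..s
    let total := total + (q * 854 + lowPrefix (s + 1))
    if q ≠ 0 then
      -- full hundreds h = 1..q-1: each "<h> hundred" occurs 100 times, "and" 99 times
      let total := total +
        (100 * ((PySem.List.pyGet? onesCum q).getD 0 - (PySem.List.pyGet? onesCum 1).getD 0) + (q - 1) * 997)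
      -- partial hundred h = q: occurs s+1 times, "and" s times
      total + ((s + 1) * ((PySem.List.pyGet? onesB q).getD 0 + 7) + 3 * s)
    else total

-- ===== PRECONDITION & SPEC =====
def Spec_numtoEng (num : Int) (out : Int) : Prop := out = numtoEng_alt num
instance (num : Int) (out : Int) : Decidable (Spec_numtoEng num out) := by unfold Spec_numtoEng; infer_instance

-- ===== CLAIM (what is proved, stated in full; the proofs are below) =====
def Claim_equal_numtoEng : Prop := ∀ (num : Int), Dom_numtoEng num → Spec_numtoEng num (numtoEng num)

-- ===== LEMMAS AND PROOFS =====

-- the tail sum of A's per-number increments from position n on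
def tailA (n num : Int) : Int :=
  (PySem.List.pyRange (n + 1) (min num 1000 + 1) 1).foldl (fun s k => s + stepA 0 k) 0

-- prefix sums of A's per-number increments
def sumA : Nat → Int
  | 0 => 0
  | j + 1 => sumA j + stepA 0 ((j : Int) + 1)

theorem foldl_add_stepA (l : List Int) (r : Int) :
    l.foldl (fun s k => s + stepA 0 k) r = r + l.foldl (fun s k => s + stepA 0 k) 0 := by
  induction l generalizing r with
  | nil => simp
  | cons x xs ih => simp only [List.foldl_cons]; rw [ih, ih (0 + stepA 0 x)]; ring

theorem stepA_split (r n : Int) : stepA r n = r + stepA 0 n := by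
  simp only [stepA]; split_ifs <;> ring

theorem stepA_big {n : Int} (h : 1000 < n) : stepA 0 n = 0 := by
  unfold stepA
  rw [if_neg (by omega), if_neg (by omega), if_neg (by omega), if_neg (by omega)]

theorem tailA_empty {n num : Int} (h : min num 1000 + 1 ≤ n + 1) : tailA n num = 0 := by
  unfold tailA
  rw [PySem.List.pyRange_one_eq_nil h]
  simp

theorem tailA_step {n num : Int} (hlt : n < num) :
    tailA n num = stepA 0 (n + 1) + tailA (n + 1) num := by
  have hmr : min num 1000 ≤ 1000 := min_le_right _ _
  have hml : min num 1000 ≤ num := min_le_left _ _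
  by_cases hle : n + 1 ≤ min num 1000
  · unfold tailA
    rw [PySem.List.pyRange_one_cons (by omega)]
    simp only [List.foldl_cons]
    rw [foldl_add_stepA]
    ring
  · have h1000 : 1000 < n + 1 := by omega
    rw [tailA_empty (by omega), tailA_empty (by omega), stepA_big h1000]
    ring

theorem loopA_eq (f : Nat) : ∀ (num n r : Int), (num - n).toNat ≤ f →
    loopA f num n r = r + tailA n num := by
  induction f with
  | zero =>
    intro num n r hf
    have hm : min num 1000 ≤ num := min_le_left _ _
    have : ¬ n < num := by omega
    rw [tailA_empty (show min num 1000 + 1 ≤ n + 1 by omega)]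
    simp [loopA]
  | succ f ih =>
    intro num n r hf
    unfold loopA
    by_cases h : n < num
    · rw [if_pos h, ih num (n + 1) _ (by omega), stepA_split, tailA_step h]
      ring
    · have hm : min num 1000 ≤ num := min_le_left _ _
      rw [if_neg h, tailA_empty (by omega)]
      ring

-- A's result is the prefix sum of its per-number increments
theorem foldl_eq_sumA : ∀ (j : Nat),
    (PySem.List.pyRange 1 ((j : Int) + 1) 1).foldl (fun s k => s + stepA 0 k) 0 = sumA j := by
  intro j
  induction j with
  | zero => rw [PySem.List.pyRange_one_eq_nil (by norm_num)]; rfl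
  | succ j ih =>
    have h : ((j + 1 : Nat) : Int) + 1 = ((j : Int) + 1) + 1 := by push_cast; ring
    rw [h, PySem.List.pyRange_one_succ_right (by omega), List.foldl_append]
    simp only [List.foldl_cons, List.foldl_nil]
    rw [foldl_add_stepA, ih]
    simp [sumA]

-- B depends on num only through min num 1000
theorem alt_min (num : Int) : numtoEng_alt num = numtoEng_alt (min num 1000) := by
  unfold numtoEng_alt
  rw [min_assoc, min_self]

-- the aggregation formula satisfies the same recurrence as the per-number sum (checked on all 1000 steps, in chunks)
abbrev stepOK (j : Nat) : Prop :=
  numtoEng_alt ((j : Int) + 1) = numtoEng_alt (j : Int) + stepA 0 ((j : Int) + 1)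

set_option maxHeartbeats 1000000 in
set_option maxRecDepth 100000 in
theorem altStep_chunk0 : ∀ k : Fin 100, stepOK ((k : Nat)) := by decide

set_option maxHeartbeats 1000000 in
set_option maxRecDepth 100000 in
theorem altStep_chunk1 : ∀ k : Fin 100, stepOK (100 + (k : Nat)) := by decide

set_option maxHeartbeats 1000000 in
set_option maxRecDepth 100000 in
theorem altStep_chunk2 : ∀ k : Fin 100, stepOK (200 + (k : Nat)) := by decide

set_option maxHeartbeats 1000000 in
set_option maxRecDepth 100000 in
theorem altStep_chunk3 : ∀ k : Fin 100, stepOK (300 + (k : Nat)) := by decide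

set_option maxHeartbeats 1000000 in
set_option maxRecDepth 100000 in
theorem altStep_chunk4 : ∀ k : Fin 100, stepOK (400 + (k : Nat)) := by decide

set_option maxHeartbeats 1000000 in
set_option maxRecDepth 100000 in
theorem altStep_chunk5 : ∀ k : Fin 100, stepOK (500 + (k : Nat)) := by decide

set_option maxHeartbeats 1000000 in
set_option maxRecDepth 100000 in
theorem altStep_chunk6 : ∀ k : Fin 100, stepOK (600 + (k : Nat)) := by decide

set_option maxHeartbeats 1000000 in
set_option maxRecDepth 100000 in
theorem altStep_chunk7 : ∀ k : Fin 100, stepOK (700 + (k : Nat)) := by decide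

set_option maxHeartbeats 1000000 in
set_option maxRecDepth 100000 in
theorem altStep_chunk8 : ∀ k : Fin 100, stepOK (800 + (k : Nat)) := by decide

set_option maxHeartbeats 1000000 in
set_option maxRecDepth 100000 in
theorem altStep_chunk9 : ∀ k : Fin 100, stepOK (900 + (k : Nat)) := by decide

theorem alt_step : ∀ j : Nat, j < 1000 → stepOK j := by
  intro j hj
  by_cases h0 : j < 100
  · exact altStep_chunk0 ⟨j, h0⟩
  by_cases h1 : j < 200
  · have hv : stepOK (100 + (j - 100)) := altStep_chunk1 ⟨j - 100, by omega⟩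
    exact (by omega : 100 + (j - 100) = j) ▸ hv
  by_cases h2 : j < 300
  · have hv : stepOK (200 + (j - 200)) := altStep_chunk2 ⟨j - 200, by omega⟩
    exact (by omega : 200 + (j - 200) = j) ▸ hv
  by_cases h3 : j < 400
  · have hv : stepOK (300 + (j - 300)) := altStep_chunk3 ⟨j - 300, by omega⟩
    exact (by omega : 300 + (j - 300) = j) ▸ hv
  by_cases h4 : j < 500
  · have hv : stepOK (400 + (j - 400)) := altStep_chunk4 ⟨j - 400, by omega⟩
    exact (by omega : 400 + (j - 400) = j) ▸ hv
  by_cases h5 : j < 600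
  · have hv : stepOK (500 + (j - 500)) := altStep_chunk5 ⟨j - 500, by omega⟩
    exact (by omega : 500 + (j - 500) = j) ▸ hv
  by_cases h6 : j < 700
  · have hv : stepOK (600 + (j - 600)) := altStep_chunk6 ⟨j - 600, by omega⟩
    exact (by omega : 600 + (j - 600) = j) ▸ hv
  by_cases h7 : j < 800
  · have hv : stepOK (700 + (j - 700)) := altStep_chunk7 ⟨j - 700, by omega⟩
    exact (by omega : 700 + (j - 700) = j) ▸ hv
  by_cases h8 : j < 900
  · have hv : stepOK (800 + (j - 800)) := altStep_chunk8 ⟨j - 800, by omega⟩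
    exact (by omega : 800 + (j - 800) = j) ▸ hv
  · have hv : stepOK (900 + (j - 900)) := altStep_chunk9 ⟨j - 900, by omega⟩
    exact (by omega : 900 + (j - 900) = j) ▸ hv

theorem alt_zero : numtoEng_alt 0 = 0 := by decide

theorem alt_eq_sumA : ∀ (j : Nat), j ≤ 1000 → numtoEng_alt (j : Int) = sumA j := by
  intro j
  induction j with
  | zero => intro _; exact alt_zero
  | succ j ih =>
    intro hj
    have hk : j < 1000 := by omega
    have := alt_step j hk
    unfold stepOK at this
    have hc : ((j + 1 : Nat) : Int) = ((j : Nat) : Int) + 1 := by push_cast; ring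
    rw [hc, this, ih (by omega)]
    rfl

-- ===== VERDICT (by name: the statement is the Claim_ definition above) =====
theorem numtoEng_spec : Claim_equal_numtoEng := by
  intro num _
  unfold Spec_numtoEng
  by_cases h : min num 1000 ≤ 0
  · have hnum : num ≤ 0 := by rcases min_choice num 1000 with h' | h' <;> omega
    unfold numtoEng
    rw [loopA_eq num.toNat num 0 0 (by omega), tailA_empty (by omega)]
    unfold numtoEng_alt
    rw [if_pos h]
    ring
  · have hm : min num 1000 ≤ 1000 := min_le_right _ _
    have hjle : (min num 1000).toNat ≤ 1000 := by omega
    have hcast : min num 1000 = (((min num 1000).toNat : Nat) : Int) := by omega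
    have ht : tailA 0 num = sumA (min num 1000).toNat := by
      unfold tailA
      rw [show (0 : Int) + 1 = 1 by ring,
          show min num 1000 + 1 = (((min num 1000).toNat : Nat) : Int) + 1 by omega]
      exact foldl_eq_sumA _
    calc numtoEng num = 0 + tailA 0 num := by
            unfold numtoEng; rw [loopA_eq num.toNat num 0 0 (by omega)]
      _ = sumA (min num 1000).toNat := by rw [ht]; ring
      _ = numtoEng_alt (((min num 1000).toNat : Nat) : Int) := (alt_eq_sumA _ hjle).symm
      _ = numtoEng_alt (min num 1000) := by rw [← hcast]
      _ = numtoEng_alt num := (alt_min num).symm
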